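-- pv_equiv track=rewrite | github.com/anemenman/py-puzz-cr | puzz_015_itkata/k030_break_the_pieces.py | extract_piece
-- ===== SOURCE A (Python) =====
-- def extract_piece(borders, shape):
--     min_x = min(x for x, y in borders)
--     max_x = max(x for x, y in borders)
--     min_y = min(y for x, y in borders)
--     max_y = max(y for x, y in borders)
--     piece = [[" "] * (max_y - min_y + 1) for _ in range(max_x - min_x + 1)]
--     for x, y in borders:
--         border = shape[x][y]
--         if border == "+":
--             if not {(x - 1, y), (x + 1, y)} & borders: border = "-"
--             if not {(x, y - 1), (x, y + 1)} & borders: border = "|"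
--         piece[x - min_x][y - min_y] = border
--     return "\n".join("".join(row).rstrip() for row in piece)
-- ===== SOURCE B (Python) =====
-- def extract_piece(borders, shape):
--     min_x = min(x for x, y in borders)
--     max_x = max(x for x, y in borders)
--     min_y = min(y for x, y in borders)
--     max_y = max(y for x, y in borders)
--
--     def cell(x, y):
--         if (x, y) not in borders:
--             return " "
--         c = shape[x][y]
--         if c == "+":
--             if (x - 1, y) not in borders and (x + 1, y) not in borders:
--                 c = "-"
--             if (x, y - 1) not in borders and (x, y + 1) not in borders:
--                 c = "|"
--         return c
--
--     return "\n".join(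
--         "".join(cell(x, y) for y in range(min_y, max_y + 1)).rstrip()
--         for x in range(min_x, max_x + 1)
--     )
-- ===== Notes on version B (the rewrite author's own statement) =====
-- stated objective: simpler
-- what changed: B gathers: it maps over the dense rectangle (nested comprehension over range(min_x,max_x+1) x range(min_y,max_y+1)) emitting ' ' or the looked-up border character per cell, instead of A's scatter of the sparse border set into a preallocated space-filled matrix that is then joined.
import Mathlib
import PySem

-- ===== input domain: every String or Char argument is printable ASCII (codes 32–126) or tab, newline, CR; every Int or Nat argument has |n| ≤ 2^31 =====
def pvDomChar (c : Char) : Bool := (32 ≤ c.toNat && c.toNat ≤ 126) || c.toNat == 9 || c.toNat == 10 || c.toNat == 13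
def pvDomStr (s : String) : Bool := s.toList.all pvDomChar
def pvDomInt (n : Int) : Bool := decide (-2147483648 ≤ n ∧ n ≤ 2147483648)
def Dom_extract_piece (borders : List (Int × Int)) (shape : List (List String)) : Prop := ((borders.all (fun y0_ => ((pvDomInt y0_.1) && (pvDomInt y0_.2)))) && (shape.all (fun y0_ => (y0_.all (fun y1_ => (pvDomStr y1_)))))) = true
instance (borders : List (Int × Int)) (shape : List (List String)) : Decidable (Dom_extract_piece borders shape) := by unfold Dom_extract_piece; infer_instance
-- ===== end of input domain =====

-- B rebuilds the rectangle by gathering each cell from the border set (a nested comprehension over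
-- the dense grid) instead of scattering the sparse borders into a preallocated matrix; objective: simpler.

-- ===== PORT A =====
-- A scatters each border cell into a preallocated space-filled matrix, then joins the rows.
def extract_piece (borders : List (Int × Int)) (shape : List (List String)) : String :=
  match PySem.List.min? (borders.map (·.1)) (fun v => v),
        PySem.List.max? (borders.map (·.1)) (fun v => v),
        PySem.List.min? (borders.map (·.2)) (fun v => v),
        PySem.List.max? (borders.map (·.2)) (fun v => v) with
  | some min_x, some max_x, some min_y, some max_y =>
    let piece0 : List (List String) :=
      List.replicate (max_x - min_x + 1).toNat (List.replicate (max_y - min_y + 1).toNat " ")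
    let piece := borders.foldl (fun piece p =>
      -- shape[p.1][p.2]; Pre_ guarantees the indices are in range, so the "" default is never used
      let border := ((PySem.List.pyGet? shape p.1).bind (fun row => PySem.List.pyGet? row p.2)).getD ""
      let border := if border = "+" then
          let border := if PySem.Set.inter (PySem.Set.ofList [(p.1 - 1, p.2), (p.1 + 1, p.2)]) borders = [] then "-" else border
          let border := if PySem.Set.inter (PySem.Set.ofList [(p.1, p.2 - 1), (p.1, p.2 + 1)]) borders = [] then "|" else border
          border
        else border
      -- piece[p.1-min_x][p.2-min_y] = border; both offsets are ≥ 0 (min_x/min_y are minima), so .toNat is exact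
      piece.set (p.1 - min_x).toNat ((piece.getD (p.1 - min_x).toNat []).set (p.2 - min_y).toNat border))
      piece0
    PySem.Str.join "\n" (piece.map (fun row => PySem.Str.rstrip (PySem.Str.join "" row)))
  | _, _, _, _ => ""   -- unreachable under Pre_ (borders ≠ []): Python raises ValueError on an empty set

-- ===== PORT B =====
-- helper 'cell' of Source B
def pvCellB (borders : List (Int × Int)) (shape : List (List String)) (x y : Int) : String :=
  if (x, y) ∉ borders then " "
  else
    -- shape[x][y]; Pre_ guarantees the indices are in range, so the "" default is never used
    let c := ((PySem.List.pyGet? shape x).bind (fun row => PySem.List.pyGet? row y)).getD ""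
    if c = "+" then
      let c := if (x - 1, y) ∉ borders ∧ (x + 1, y) ∉ borders then "-" else c
      let c := if (x, y - 1) ∉ borders ∧ (x, y + 1) ∉ borders then "|" else c
      c
    else c

def extract_piece_alt (borders : List (Int × Int)) (shape : List (List String)) : String :=
  match PySem.List.min? (borders.map (·.1)) (fun v => v) with
  | none => ""   -- unreachable under Pre_ (borders ≠ []): Python raises ValueError on an empty set
  | some min_x =>
  match PySem.List.max? (borders.map (·.1)) (fun v => v) with
  | none => ""
  | some max_x =>
  match PySem.List.min? (borders.map (·.2)) (fun v => v) with
  | none => ""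
  | some min_y =>
  match PySem.List.max? (borders.map (·.2)) (fun v => v) with
  | none => ""
  | some max_y =>
    PySem.Str.join "\n" ((PySem.List.pyRange min_x (max_x + 1) 1).map (fun x =>
      PySem.Str.rstrip (PySem.Str.join "" ((PySem.List.pyRange min_y (max_y + 1) 1).map (fun y =>
        pvCellB borders shape x y)))))

-- ===== PRECONDITION & SPEC =====
-- Pre_ excludes the inputs on which Python A raises: an empty border set (ValueError from min)
-- and border coordinates that are not valid Python indices into shape (IndexError).
def Pre_extract_piece (borders : List (Int × Int)) (shape : List (List String)) : Prop :=
  borders ≠ [] ∧ ∀ p ∈ borders,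
    PySem.Raise.InRange shape.length p.1 ∧
    PySem.Raise.InRange ((PySem.List.pyGet? shape p.1).getD []).length p.2
instance (borders : List (Int × Int)) (shape : List (List String)) : Decidable (Pre_extract_piece borders shape) := by
  unfold Pre_extract_piece; infer_instance

def pvWitness_extract_piece : (List (Int × Int)) × List (List String) :=
  ([(0, 0), (0, 1), (1, 0), (1, 1)], [["+", "+"], ["+", "+"]])

def Spec_extract_piece (borders : List (Int × Int)) (shape : List (List String)) (out : String) : Prop := out = extract_piece_alt borders shape
instance (borders : List (Int × Int)) (shape : List (List String)) (out : String) : Decidable (Spec_extract_piece borders shape out) := by unfold Spec_extract_piece; infer_instance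

-- ===== CLAIM (what is proved, stated in full; the proofs are below) =====
def Claim_equal_extract_piece : Prop := ∀ (borders : List (Int × Int)) (shape : List (List String)), Dom_extract_piece borders shape → Pre_extract_piece borders shape → Spec_extract_piece borders shape (extract_piece borders shape)

-- ===== LEMMAS AND PROOFS =====

-- the border character A computes for a cell p ∈ borders
def pvF (borders : List (Int × Int)) (shape : List (List String)) (p : Int × Int) : String :=
  let border := ((PySem.List.pyGet? shape p.1).bind (fun row => PySem.List.pyGet? row p.2)).getD ""
  if border = "+" then
    let border := if PySem.Set.inter (PySem.Set.ofList [(p.1 - 1, p.2), (p.1 + 1, p.2)]) borders = [] then "-" else border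
    let border := if PySem.Set.inter (PySem.Set.ofList [(p.1, p.2 - 1), (p.1, p.2 + 1)]) borders = [] then "|" else border
    border
  else border

lemma pvInter_pair_eq_nil {a b : Int × Int} {t : List (Int × Int)} :
    (PySem.Set.inter (PySem.Set.ofList [a, b]) t = []) ↔ (a ∉ t ∧ b ∉ t) := by
  constructor
  · intro h
    constructor <;> intro hm
    · have : a ∈ PySem.Set.inter (PySem.Set.ofList [a, b]) t := by
        rw [PySem.Set.mem_inter]
        exact ⟨by simp [PySem.Set.mem_ofList], hm⟩
      simp [h] at this
    · have : b ∈ PySem.Set.inter (PySem.Set.ofList [a, b]) t := by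
        rw [PySem.Set.mem_inter]
        exact ⟨by simp [PySem.Set.mem_ofList], hm⟩
      simp [h] at this
  · intro ⟨ha, hb⟩
    rw [List.eq_nil_iff_forall_not_mem]
    intro y hy
    rw [PySem.Set.mem_inter] at hy
    have := hy.1
    simp [PySem.Set.mem_ofList] at this
    rcases this with h | h <;> subst h
    · exact ha hy.2
    · exact hb hy.2

lemma pvCellB_mem (borders : List (Int × Int)) (shape : List (List String)) (p : Int × Int)
    (hp : p ∈ borders) : pvCellB borders shape p.1 p.2 = pvF borders shape p := by
  simp only [pvCellB, pvF, hp, not_true]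
  simp [pvInter_pair_eq_nil]

-- access a cell of the matrix
def pvGet2 (g : List (List String)) (i j : Nat) : String := (g.getD i []).getD j " "

-- the scatter step of A's loop
def pvStep (borders : List (Int × Int)) (shape : List (List String)) (mx my : Int) :
    List (List String) → (Int × Int) → List (List String) :=
  fun piece p =>
    piece.set (p.1 - mx).toNat ((piece.getD (p.1 - mx).toNat []).set (p.2 - my).toNat (pvF borders shape p))

lemma pvScatter (borders : List (Int × Int)) (shape : List (List String)) (mx my : Int)
    (H W : Nat) :
    ∀ (l : List (Int × Int)) (g : List (List String)),
      g.length = H → (∀ row ∈ g, row.length = W) →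
      (∀ p ∈ l, 0 ≤ p.1 - mx ∧ (p.1 - mx).toNat < H ∧ 0 ≤ p.2 - my ∧ (p.2 - my).toNat < W) →
      (l.foldl (pvStep borders shape mx my) g).length = H ∧
      (∀ row ∈ l.foldl (pvStep borders shape mx my) g, row.length = W) ∧
      (∀ i j : Nat, i < H → j < W →
        pvGet2 (l.foldl (pvStep borders shape mx my) g) i j =
          if (mx + i, my + j) ∈ l then pvF borders shape (mx + i, my + j) else pvGet2 g i j) := by
  intro l
  induction l with
  | nil => intro g hg hrow _; exact ⟨hg, hrow, fun i j _ _ => by simp⟩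
  | cons p rest ih =>
    intro g hg hrow hb
    have hp := hb p (List.mem_cons_self ..)
    obtain ⟨hx0, hxH, hy0, hyW⟩ := hp
    have hlt : (p.1 - mx).toNat < g.length := by omega
    -- the updated grid g' keeps the shape
    have hrowlen : (g[(p.1 - mx).toNat]?.getD []).length = W := by
      rw [List.getElem?_eq_getElem hlt]
      exact hrow _ (List.getElem_mem hlt)
    have hrowlenD : (g.getD (p.1 - mx).toNat []).length = W := by
      rw [List.getD_eq_getElem?_getD]; exact hrowlen
    have hg'len : (pvStep borders shape mx my g p).length = H := by
      simp [pvStep, hg]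
    have hg'rows : ∀ r ∈ pvStep borders shape mx my g p, r.length = W := by
      intro r hr
      simp only [pvStep] at hr
      rcases List.mem_or_eq_of_mem_set hr with h | h
      · exact hrow r h
      · subst h; rw [List.length_set]; exact hrowlenD
    have hg2 : ∀ i j : Nat, i < H → j < W →
        pvGet2 (pvStep borders shape mx my g p) i j =
          if (mx + (i:Int), my + (j:Int)) = p then pvF borders shape p else pvGet2 g i j := by
      intro i j hi hj
      simp only [pvStep, pvGet2, List.getD_eq_getElem?_getD, List.getElem?_set]
      by_cases hieq : (p.1 - mx).toNat = i
      · rw [if_pos hieq, if_pos hlt]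
        simp only [Option.getD_some]
        rw [List.getElem?_set]
        by_cases hjeq : (p.2 - my).toNat = j
        · have hpe : (mx + (i:Int), my + (j:Int)) = p := by
            have h1 : p.1 = mx + (i:Int) := by omega
            have h2 : p.2 = my + (j:Int) := by omega
            exact Prod.ext h1.symm h2.symm
          have hjlt : (p.2 - my).toNat < (g[(p.1 - mx).toNat]?.getD []).length := by rw [hrowlen]; omega
          rw [if_pos hjeq, if_pos hjlt, if_pos hpe]
          simp
        · have hpe : ¬ ((mx + (i:Int), my + (j:Int)) = p) := by
            intro h
            apply hjeq
            have h2 : p.2 = my + (j:Int) := by rw [← h]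
            omega
          rw [if_neg hjeq, if_neg hpe, hieq]
      · have hpe : ¬ ((mx + (i:Int), my + (j:Int)) = p) := by
          intro h
          apply hieq
          have h1 : p.1 = mx + (i:Int) := by rw [← h]
          omega
        rw [if_neg hieq, if_neg hpe]
    have hrest : ∀ q ∈ rest, 0 ≤ q.1 - mx ∧ (q.1 - mx).toNat < H ∧ 0 ≤ q.2 - my ∧ (q.2 - my).toNat < W :=
      fun q hq => hb q (List.mem_cons_of_mem _ hq)
    obtain ⟨ih1, ih2, ih3⟩ := ih (pvStep borders shape mx my g p) hg'len hg'rows hrest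
    refine ⟨by simpa using ih1, by simpa using ih2, ?_⟩
    intro i j hi hj
    rw [List.foldl_cons, ih3 i j hi hj, hg2 i j hi hj]
    by_cases hmem : (mx + (i:Int), my + (j:Int)) ∈ rest
    · simp [hmem, List.mem_cons]
    · by_cases hpe : (mx + (i:Int), my + (j:Int)) = p
      · simp [hpe]
      · simp [hmem, hpe, List.mem_cons]

-- ===== VERDICT (by name: the statement is the Claim_ definition above) =====
lemma pvGet2_replicate (H W : Nat) (i j : Nat) (hi : i < H) (hj : j < W) :
    pvGet2 (List.replicate H (List.replicate W " ")) i j = " " := by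
  simp [pvGet2, List.getD_eq_getElem?_getD, hi, hj]

lemma pvMain (borders : List (Int × Int)) (shape : List (List String))
    (_hne : borders ≠ [])
    (mx Mx my My : Int)
    (h1 : PySem.List.min? (borders.map (·.1)) (fun v => v) = some mx)
    (h2 : PySem.List.max? (borders.map (·.1)) (fun v => v) = some Mx)
    (h3 : PySem.List.min? (borders.map (·.2)) (fun v => v) = some my)
    (h4 : PySem.List.max? (borders.map (·.2)) (fun v => v) = some My) :
    borders.foldl (pvStep borders shape mx my)
        (List.replicate (Mx - mx + 1).toNat (List.replicate (My - my + 1).toNat " ")) =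
      (PySem.List.pyRange mx (Mx + 1) 1).map (fun x =>
        (PySem.List.pyRange my (My + 1) 1).map (fun y => pvCellB borders shape x y)) := by
  set H := (Mx - mx + 1).toNat with hH
  set W := (My - my + 1).toNat with hW
  have hbnd : ∀ p ∈ borders, 0 ≤ p.1 - mx ∧ (p.1 - mx).toNat < H ∧ 0 ≤ p.2 - my ∧ (p.2 - my).toNat < W := by
    intro p hp
    have b1 := PySem.List.min?_isMin h1 p.1 (List.mem_map_of_mem hp)
    have b2 := PySem.List.max?_isMax h2 p.1 (List.mem_map_of_mem hp)
    have b3 := PySem.List.min?_isMin h3 p.2 (List.mem_map_of_mem hp)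
    have b4 := PySem.List.max?_isMax h4 p.2 (List.mem_map_of_mem hp)
    simp only at b1 b2 b3 b4
    refine ⟨by omega, by omega, by omega, by omega⟩
  obtain ⟨hL, hR, hC⟩ := pvScatter borders shape mx my H W borders
    (List.replicate H (List.replicate W " "))
    (by simp) (by intro row hrow; rw [List.eq_of_mem_replicate hrow]; simp) hbnd
  apply List.ext_getElem
  · rw [hL, List.length_map, PySem.List.length_pyRange_one]; omega
  intro i hi hi'
  rw [List.getElem_map, PySem.List.getElem_pyRange_one]
  have hiH : i < H := by rwa [hL] at hi
  apply List.ext_getElem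
  · rw [hR _ (List.getElem_mem hi), List.length_map, PySem.List.length_pyRange_one]; omega
  intro j hj hj'
  have hjW : j < W := by rw [hR _ (List.getElem_mem hi)] at hj; exact hj
  rw [List.getElem_map, PySem.List.getElem_pyRange_one]
  have hget : (borders.foldl (pvStep borders shape mx my)
      (List.replicate H (List.replicate W " ")))[i][j] = pvGet2 (borders.foldl (pvStep borders shape mx my)
      (List.replicate H (List.replicate W " "))) i j := by
    simp [pvGet2, List.getD_eq_getElem?_getD, hi, hj]
  rw [hget, hC i j hiH hjW]
  by_cases hmem : (mx + (i:Int), my + (j:Int)) ∈ borders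
  · rw [if_pos hmem, ← pvCellB_mem borders shape _ hmem]
  · rw [if_neg hmem, pvGet2_replicate H W i j hiH hjW, pvCellB, if_pos hmem]

theorem extract_piece_spec : Claim_equal_extract_piece := by
  intro borders shape _ hpre
  obtain ⟨hne, _⟩ := hpre
  unfold Spec_extract_piece
  rcases h1 : PySem.List.min? (borders.map (·.1)) (fun v => v) with _ | mx
  · rw [PySem.List.min?_eq_none_iff] at h1
    exact absurd (List.map_eq_nil_iff.mp h1) hne
  rcases h2 : PySem.List.max? (borders.map (·.1)) (fun v => v) with _ | Mx
  · rw [PySem.List.max?_eq_none_iff] at h2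
    exact absurd (List.map_eq_nil_iff.mp h2) hne
  rcases h3 : PySem.List.min? (borders.map (·.2)) (fun v => v) with _ | my
  · rw [PySem.List.min?_eq_none_iff] at h3
    exact absurd (List.map_eq_nil_iff.mp h3) hne
  rcases h4 : PySem.List.max? (borders.map (·.2)) (fun v => v) with _ | My
  · rw [PySem.List.max?_eq_none_iff] at h4
    exact absurd (List.map_eq_nil_iff.mp h4) hne
  have hA : extract_piece borders shape =
      PySem.Str.join "\n" ((borders.foldl (pvStep borders shape mx my)
        (List.replicate (Mx - mx + 1).toNat (List.replicate (My - my + 1).toNat " "))).map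
        (fun row => PySem.Str.rstrip (PySem.Str.join "" row))) := by
    unfold extract_piece
    rw [h1, h2, h3, h4]
    rfl
  have hB : extract_piece_alt borders shape =
      PySem.Str.join "\n" ((PySem.List.pyRange mx (Mx + 1) 1).map (fun x =>
        PySem.Str.rstrip (PySem.Str.join "" ((PySem.List.pyRange my (My + 1) 1).map (fun y =>
          pvCellB borders shape x y))))) := by
    unfold extract_piece_alt
    rw [h1, h2, h3, h4]
  rw [hA, hB, pvMain borders shape hne mx Mx my My h1 h2 h3 h4, List.map_map]
  rfl
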